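-- pv_equiv track=rewrite | github.com/thisisharrison/preface-django-wordle | project/wordle_app/utils.py | attempts_to_unique_dict
-- ===== SOURCE A (Python) =====
-- from functools import reduce
--
-- def attempts_to_unique_dict(attempts_list):
--     order = {"absent": 0, "present": 1, "correct": 2}
--
--     def add_to_dict(summary, word):
--         for char, state in word:
--             if char in summary and order[state] > order[summary[char]]:
--                 summary[char] = state
--             elif char not in summary:
--                 summary[char] = state
--         return summary
--
--     return reduce(add_to_dict, attempts_list, {})
-- ===== SOURCE B (Python) =====
-- def attempts_to_unique_dict(attempts_list):
--     order = {"absent": 0, "present": 1, "correct": 2}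
--
--     # pass 1: group every occurrence's state by character, in first-seen order
--     groups = {}
--     for word in attempts_list:
--         for char, state in word:
--             groups.setdefault(char, []).append(state)
--
--     # pass 2: per character, reduce its occurrence states to the best one
--     def best(states):
--         b = states[0]
--         for s in states[1:]:
--             if order[s] > order[b]:
--                 b = s
--         return b
--
--     return {char: best(states) for char, states in groups.items()}
-- ===== Notes on version B (the rewrite author's own statement) =====
-- stated objective: alternative
-- what changed: B replaces A's single interleaved reduce that updates a char->state dict in place by a two-pass group-then-reduce: pass 1 groups all occurrence states per character (setdefault/append) in first-seen order, pass 2 reduces each character's state list to its max-priority state independently.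
import Mathlib
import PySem

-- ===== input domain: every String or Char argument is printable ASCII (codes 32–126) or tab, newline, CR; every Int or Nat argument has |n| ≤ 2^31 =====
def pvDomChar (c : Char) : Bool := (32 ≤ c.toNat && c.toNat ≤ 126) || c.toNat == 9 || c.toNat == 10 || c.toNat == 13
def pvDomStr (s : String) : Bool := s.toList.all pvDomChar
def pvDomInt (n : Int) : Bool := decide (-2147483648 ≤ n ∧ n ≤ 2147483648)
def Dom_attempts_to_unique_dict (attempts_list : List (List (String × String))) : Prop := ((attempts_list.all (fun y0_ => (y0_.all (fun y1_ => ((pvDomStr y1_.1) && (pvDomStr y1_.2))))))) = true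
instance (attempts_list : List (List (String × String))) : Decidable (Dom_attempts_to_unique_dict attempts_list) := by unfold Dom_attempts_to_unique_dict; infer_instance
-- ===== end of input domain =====

-- B merges the attempts by a two-pass group-then-reduce (group states per char, then take each
-- char's max-priority state) instead of A's single interleaved dict-update reduce; same values.

-- shared helper: the literal dict order = {"absent": 0, "present": 1, "correct": 2} of both Pythons.
def pvOrder : PySem.Dict String Int := PySem.Dict.ofList [("absent", 0), ("present", 1), ("correct", 2)]

-- order[s]; on a key outside the dict Python raises KeyError — those lookups are excluded by Pre_,
-- the total port returns -1 there.
def pvOrd (s : String) : Int := pvOrder.getD s (-1)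

-- ===== PORT A =====
-- body of A's add_to_dict for one (char, state) pair; branches in A's order.
def pvAStep (summary : PySem.Dict String String) (p : String × String) : PySem.Dict String String :=
  if summary.contains p.1 && decide (pvOrd p.2 > pvOrd (summary.getD p.1 "")) then
    summary.insert p.1 p.2
  else if summary.contains p.1 = false then
    summary.insert p.1 p.2
  else
    summary

def attempts_to_unique_dict (attempts_list : List (List (String × String))) : List (String × String) :=
  (attempts_list.foldl (fun summary word => word.foldl pvAStep summary) PySem.Dict.empty).items

-- ===== PORT B =====
-- groups.setdefault(char, []).append(state)
def pvBStep (g : PySem.Dict String (List String)) (p : String × String) : PySem.Dict String (List String) :=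
  g.modify p.1 [] (· ++ [p.2])

-- best(states): b = states[0], then scan states[1:] keeping the higher-priority state.
-- states[0] on [] is unreachable (every group is nonempty); the port returns "" there.
def pvBest (states : List String) : String :=
  match states with
  | [] => ""
  | b :: rest => rest.foldl (fun b s => if pvOrd s > pvOrd b then s else b) b

def attempts_to_unique_dict_alt (attempts_list : List (List (String × String))) : List (String × String) :=
  let groups := attempts_list.foldl (fun g word => word.foldl pvBStep g) PySem.Dict.empty
  groups.items.map (fun p => (p.1, pvBest p.2))

-- ===== PRECONDITION & SPEC =====
-- Python A raises KeyError (order[state]) exactly when some character occurs in ≥ 2 (char, state)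
-- pairs and one of its states is not "absent"/"present"/"correct"; B raises there too. Pre_ admits
-- exactly the inputs on which both Pythons return.
def Pre_attempts_to_unique_dict (attempts_list : List (List (String × String))) : Prop :=
  ∀ p ∈ attempts_list.flatMap id,
    (attempts_list.flatMap id).countP (fun q => q.1 == p.1) ≤ 1 ∨
      p.2 ∈ ["absent", "present", "correct"]

instance (attempts_list : List (List (String × String))) : Decidable (Pre_attempts_to_unique_dict attempts_list) := by
  unfold Pre_attempts_to_unique_dict; infer_instance

def pvWitness_attempts_to_unique_dict : (List (List (String × String))) :=
  [[("a", "present")], [("a", "correct"), ("b", "absent")]]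

def Spec_attempts_to_unique_dict (attempts_list : List (List (String × String))) (out : List (String × String)) : Prop := out = attempts_to_unique_dict_alt attempts_list
instance (attempts_list : List (List (String × String))) (out : List (String × String)) : Decidable (Spec_attempts_to_unique_dict attempts_list out) := by unfold Spec_attempts_to_unique_dict; infer_instance

-- ===== CLAIM (what is proved, stated in full; the proofs are below) =====
def Claim_equal_attempts_to_unique_dict : Prop := ∀ (attempts_list : List (List (String × String))), Dom_attempts_to_unique_dict attempts_list → Pre_attempts_to_unique_dict attempts_list → Spec_attempts_to_unique_dict attempts_list (attempts_to_unique_dict attempts_list)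

-- ===== LEMMAS AND PROOFS =====

-- one pair-step of A, seen through get?
lemma pvAStep_get? (d : PySem.Dict String String) (p : String × String) (c : String) :
    (pvAStep d p).get? c =
      if c = p.1 then
        some (match d.get? p.1 with
              | none => p.2
              | some b => if pvOrd p.2 > pvOrd b then p.2 else b)
      else d.get? c := by
  unfold pvAStep
  rw [PySem.Dict.contains_eq_isSome_get?]
  cases h : d.get? p.1 with
  | none => simp [PySem.Dict.get?_insert]
  | some b =>
    rw [PySem.Dict.getD_of_get?_eq_some d _ h]
    by_cases hgt : pvOrd p.2 > pvOrd b
    · simp [hgt, PySem.Dict.get?_insert]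
    · simp [hgt]
      intro hc; subst hc; exact h

-- A's fold, seen through get?: per character it is a left fold over that character's states
lemma foldA_get? (l : List (String × String)) (d : PySem.Dict String String) (c : String) :
    (l.foldl pvAStep d).get? c =
      ((l.filter (fun q => q.1 == c)).map (·.2)).foldl
        (fun o s => some (match o with | none => s | some b => if pvOrd s > pvOrd b then s else b))
        (d.get? c) := by
  induction l generalizing d with
  | nil => rfl
  | cons p l ih =>
    simp only [List.foldl_cons, ih, List.filter_cons]
    by_cases hc : p.1 = c
    · subst hc
      simp [pvAStep_get?]
    · have hb : (p.1 == c) = false := by simp [hc]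
      simp [hb, pvAStep_get?, Ne.symm hc]

-- the option-fold of A's updates equals B's best-scan once the accumulator is some
lemma foldOb_some (rest : List String) (b : String) :
    rest.foldl
        (fun o s => some (match o with | none => s | some b => if pvOrd s > pvOrd b then s else b))
        (some b)
      = some (rest.foldl (fun b s => if pvOrd s > pvOrd b then s else b) b) := by
  induction rest generalizing b with
  | nil => rfl
  | cons s rest ih => simp [List.foldl_cons, ih]

lemma foldOb_none_eq_best (sts : List String) (h : sts ≠ []) :
    sts.foldl
        (fun o s => some (match o with | none => s | some b => if pvOrd s > pvOrd b then s else b))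
        none
      = some (pvBest sts) := by
  cases sts with
  | nil => exact absurd rfl h
  | cons b rest => simpa [pvBest] using foldOb_some rest b

-- keys of A's fold: the distinct characters in first-seen order
lemma keys_foldA (l : List (String × String)) (d : PySem.Dict String String) :
    (l.foldl pvAStep d).keys = PySem.Set.update d.keys (l.map (·.1)) := by
  induction l generalizing d with
  | nil => rfl
  | cons p l ih =>
    simp only [List.foldl_cons, List.map_cons, PySem.Set.update, ih]
    congr 1
    unfold pvAStep PySem.Set.add
    by_cases hc : d.contains p.1
    · have hm : p.1 ∈ d.keys := (PySem.Dict.contains_iff_mem_keys d p.1).mp hc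
      by_cases hgt : decide (pvOrd p.2 > pvOrd (d.getD p.1 "")) = true
      · simp [hc, hgt, PySem.Dict.keys_insert_of_contains d _ hc, hm]
      · simp [hc, hgt, hm]
    · have hb : d.contains p.1 = false := by simpa using hc
      have hm : p.1 ∉ d.keys := fun h => hc ((PySem.Dict.contains_iff_mem_keys d p.1).mpr h)
      simp [hb, PySem.Dict.keys_insert_of_not_contains d _ hb, hm]

-- keys of B's grouping fold: the same distinct characters
lemma keys_foldB (l : List (String × String)) (d : PySem.Dict String (List String)) :
    (l.foldl pvBStep d).keys = PySem.Set.update d.keys (l.map (·.1)) := by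
  induction l generalizing d with
  | nil => rfl
  | cons p l ih =>
    simp only [List.foldl_cons, List.map_cons, PySem.Set.update, ih]
    congr 1
    unfold pvBStep PySem.Dict.modify PySem.Set.add
    by_cases hc : d.contains p.1
    · have hm : p.1 ∈ d.keys := (PySem.Dict.contains_iff_mem_keys d p.1).mp hc
      simp [PySem.Dict.keys_insert_of_contains d _ hc, hm]
    · have hb : d.contains p.1 = false := by simpa using hc
      have hm : p.1 ∉ d.keys := fun h => hc ((PySem.Dict.contains_iff_mem_keys d p.1).mpr h)
      simp [PySem.Dict.keys_insert_of_not_contains d _ hb, hm]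

-- a dict with nodup keys is its keys list paired with its lookups
lemma items_eq_map_keys {V : Type} (d : PySem.Dict String V) (h : d.keys.Nodup) (dfl : V) :
    d.items = d.keys.map (fun k => (k, d.getD k dfl)) := by
  unfold PySem.Dict.keys
  rw [List.map_map]
  conv_lhs => rw [← List.map_id d.items]
  refine List.map_congr_left ?_
  rintro ⟨k, v⟩ hp
  have := PySem.Dict.getD_of_mem_items d hp h dfl
  simp [this]

-- the two ports agree on every input
lemma ports_eq (al : List (List (String × String))) :
    attempts_to_unique_dict al = attempts_to_unique_dict_alt al := by
  unfold attempts_to_unique_dict attempts_to_unique_dict_alt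
  rw [show (al.foldl (fun summary word => word.foldl pvAStep summary) PySem.Dict.empty)
        = ((al.flatMap id).foldl pvAStep PySem.Dict.empty) by
      rw [List.foldl_flatMap]; rfl]
  rw [show (al.foldl (fun g word => word.foldl pvBStep g) PySem.Dict.empty)
        = ((al.flatMap id).foldl pvBStep PySem.Dict.empty) by
      rw [List.foldl_flatMap]; rfl]
  set fl := al.flatMap id with hfl
  set S := fl.foldl pvAStep PySem.Dict.empty with hS
  set G := fl.foldl pvBStep PySem.Dict.empty with hG
  show S.items = G.items.map (fun p => (p.1, pvBest p.2))
  have hkS : S.keys = PySem.Set.ofList (fl.map (·.1)) := by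
    rw [hS, keys_foldA, PySem.Dict.keys_empty]; rfl
  have hkG : G.keys = PySem.Set.ofList (fl.map (·.1)) := by
    rw [hG, keys_foldB, PySem.Dict.keys_empty]; rfl
  have hndS : S.keys.Nodup := by rw [hkS]; exact PySem.Set.nodup_ofList _
  have hndG : G.keys.Nodup := by rw [hkG]; exact PySem.Set.nodup_ofList _
  rw [items_eq_map_keys S hndS "", items_eq_map_keys G hndG [], List.map_map]
  rw [hkS, hkG]
  refine List.map_congr_left ?_
  intro k hk
  have hk' : k ∈ fl.map (·.1) := (PySem.Set.mem_ofList _ _).mp hk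
  -- G's group for k is exactly k's state list
  have hGk : G.getD k [] = (fl.filter (fun q => q.1 == k)).map (·.2) := by
    have : G = fl.foldl (fun d p => d.modify p.1 [] fun x => x ++ [p.2]) PySem.Dict.empty := by
      rw [hG]; rfl
    rw [this, PySem.Dict.getD_foldl_modify_append, PySem.Dict.getD_empty, List.nil_append]
  -- k's state list is nonempty
  have hne : (fl.filter (fun q => q.1 == k)).map (·.2) ≠ [] := by
    obtain ⟨p, hp, hpk⟩ := List.mem_map.mp hk'
    have : p ∈ fl.filter (fun q => q.1 == k) := by
      simp [List.mem_filter, hp, hpk]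
    intro hnil
    rw [List.map_eq_nil_iff.mp hnil] at this
    exact (List.not_mem_nil) this
  -- S's value at k is best of that list
  have hSk : S.get? k = some (pvBest ((fl.filter (fun q => q.1 == k)).map (·.2))) := by
    rw [hS, foldA_get?, PySem.Dict.get?_empty, foldOb_none_eq_best _ hne]
  simp only [Function.comp]
  rw [PySem.Dict.getD_eq_get?_getD, hSk, hGk]
  rfl

-- ===== VERDICT (by name: the statement is the Claim_ definition above) =====
theorem attempts_to_unique_dict_spec : Claim_equal_attempts_to_unique_dict := by
  intro al _ _
  unfold Spec_attempts_to_unique_dict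
  exact ports_eq al
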